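-- pv_equiv track=rewrite | github.com/danejo3/CS235TA | submission_driver (copy 9.25.19)/Grader.py | get_driver_key_word
-- ===== SOURCE A (Python) =====
-- def get_driver_key_word(my_array):
--     new_string = ''
--     string = False
--     for line in my_array:
--         if string:
--             if line[-1:] == '\"':
--                 new_string += line[:-1]
--                 break
--             else:
--                 new_string += line
--                 new_string += ' '
--         elif line[:1] == '\"':
--             new_string += line[1:]
--             new_string += ' '
--             string = True
--     return new_string
-- ===== SOURCE B (Python) =====
-- def get_driver_key_word(my_array):
--     # staged index-based approach: locate the opening-quote token and the closing-quote
--     # token by index, then assemble the result with join/slicing (no state flag, no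
--     # element-by-element accumulation)
--     starts = [(i, t) for i, t in enumerate(my_array) if t.startswith('"')]
--     if not starts:
--         return ''
--     i, t = starts[0]
--     head = t[1:]
--     tail = my_array[i + 1:]
--     closes = [(j, c) for j, c in enumerate(tail) if c.endswith('"')]
--     if not closes:
--         return ' '.join([head] + tail) + ' '
--     j, c = closes[0]
--     return ' '.join([head] + tail[:j]) + ' ' + c[:-1]
-- ===== Notes on version B (the rewrite author's own statement) =====
-- stated objective: alternative
-- what changed: Replaces A's single-pass boolean-flag accumulator with a staged index-based algorithm: list the indices of quote-opening and quote-closing tokens via enumerate-filters, then assemble the result in one shot with slicing and ' '.join.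
import Mathlib
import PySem

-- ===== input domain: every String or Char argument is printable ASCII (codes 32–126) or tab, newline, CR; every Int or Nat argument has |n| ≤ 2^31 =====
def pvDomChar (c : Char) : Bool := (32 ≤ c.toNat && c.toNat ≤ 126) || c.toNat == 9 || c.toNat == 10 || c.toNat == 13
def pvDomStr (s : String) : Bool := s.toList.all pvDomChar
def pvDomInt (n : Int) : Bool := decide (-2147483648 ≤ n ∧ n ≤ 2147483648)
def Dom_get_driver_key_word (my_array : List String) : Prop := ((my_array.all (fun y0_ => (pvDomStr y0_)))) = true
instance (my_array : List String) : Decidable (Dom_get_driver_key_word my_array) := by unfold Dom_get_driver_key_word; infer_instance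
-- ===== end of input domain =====

-- B replaces A's boolean-flag single pass with a staged index-based algorithm
-- (enumerate-filter for the opening/closing quote indices, then slice + join); same return value.

-- ===== PORT A =====
-- the for-loop with the 'string' flag; accumulator kept as List Char (String.ofList at the end)
def pvGoA : List String → List Char → Bool → List Char
  | [], acc, _ => acc
  | line :: rest, acc, string =>
    let l := line.toList
    if string then
      if PySem.List.slice l (some (-1)) none = ['"'] then
        acc ++ PySem.List.slice l none (some (-1))          -- break
      else
        pvGoA rest (acc ++ l ++ [' ']) string
    else if PySem.List.slice l none (some 1) = ['"'] then
      pvGoA rest (acc ++ PySem.List.slice l (some 1) none ++ [' ']) true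
    else
      pvGoA rest acc string

def get_driver_key_word (my_array : List String) : String :=
  String.ofList (pvGoA my_array [] false)

-- ===== PORT B =====
-- starts = [(i, t) for i, t in enumerate(my_array) if t.startswith('"')]
def pvStartsB (my_array : List String) : List (Int × String) :=
  (PySem.List.enumerate my_array 0).filter (fun p => PySem.Str.startswith p.2 "\"")

-- closes = [(j, c) for j, c in enumerate(tail) if c.endswith('"')]
def pvClosesB (tail : List String) : List (Int × String) :=
  (PySem.List.enumerate tail 0).filter (fun p => PySem.Str.endswith p.2 "\"")

def get_driver_key_word_alt (my_array : List String) : String :=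
  match pvStartsB my_array with
  | [] => ""
  | (i, t) :: _ =>
    let head := PySem.List.slice t.toList (some 1) none                 -- t[1:]
    let tail := PySem.List.slice my_array (some (i + 1)) none           -- my_array[i+1:]
    match pvClosesB tail with
    | [] =>
      String.ofList (PySem.Chars.join [' '] (head :: tail.map String.toList) ++ [' '])
    | (j, c) :: _ =>
      String.ofList (PySem.Chars.join [' ']
          (head :: (PySem.List.slice tail none (some j)).map String.toList)
        ++ [' '] ++ PySem.List.slice c.toList none (some (-1)))

-- ===== PRECONDITION & SPEC =====
def Spec_get_driver_key_word (my_array : List String) (out : String) : Prop := out = get_driver_key_word_alt my_array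
instance (my_array : List String) (out : String) : Decidable (Spec_get_driver_key_word my_array out) := by unfold Spec_get_driver_key_word; infer_instance

-- ===== CLAIM (what is proved, stated in full; the proofs are below) =====
def Claim_equal_get_driver_key_word : Prop := ∀ (my_array : List String), Dom_get_driver_key_word my_array → Spec_get_driver_key_word my_array (get_driver_key_word my_array)

-- ===== LEMMAS AND PROOFS =====

-- proof-only helpers: A's loop split into its two phases
def pvTailA : List String → List Char → List Char
  | [], acc => acc
  | t :: rest, acc =>
    let l := t.toList
    if PySem.List.slice l (some (-1)) none = ['"'] then
      acc ++ PySem.List.slice l none (some (-1))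
    else
      pvTailA rest (acc ++ l ++ [' '])

def pvScanA : List String → List Char
  | [] => []
  | t :: rest =>
    let l := t.toList
    if PySem.List.slice l none (some 1) = ['"'] then
      pvTailA rest (PySem.List.slice l (some 1) none ++ [' '])
    else
      pvScanA rest

theorem pvTailA_shift (l : List String) (s t : List Char) :
    pvTailA l (s ++ t) = s ++ pvTailA l t := by
  induction l generalizing t with
  | nil => rfl
  | cons x rest ih =>
    simp only [pvTailA]
    split
    · simp [List.append_assoc]
    · rw [List.append_assoc, List.append_assoc, List.append_assoc, ih]

theorem pvGoA_true (l : List String) (acc : List Char) :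
    pvGoA l acc true = pvTailA l acc := by
  induction l generalizing acc with
  | nil => rfl
  | cons x rest ih =>
    simp only [pvGoA, pvTailA, if_pos]
    split
    · rfl
    · exact ih _

theorem pvGoA_false (l : List String) (acc : List Char) :
    pvGoA l acc false = acc ++ pvScanA l := by
  induction l generalizing acc with
  | nil => simp [pvGoA, pvScanA]
  | cons x rest ih =>
    simp only [pvGoA, pvScanA, Bool.false_eq_true, if_false]
    split
    · rw [pvGoA_true, List.append_assoc, pvTailA_shift]
    · exact ih acc

-- the two character-level tests agree
theorem start_iff (t : String) :
    PySem.List.slice t.toList none (some 1) = ['"'] ↔ PySem.Str.startswith t "\"" = true := by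
  rw [show ((1:Int)) = ((1:Nat):Int) by norm_num, PySem.List.slice_to_natCast]
  simp [PySem.Str.startswith, PySem.Chars.startswith]
  cases t.toList with
  | nil => simp
  | cons a l => simp; exact eq_comm

theorem end_iff (t : String) :
    PySem.List.slice t.toList (some (-1)) none = ['"'] ↔ PySem.Str.endswith t "\"" = true := by
  rw [PySem.List.slice_from_neg_one]
  simp only [PySem.Str.endswith, PySem.Chars.endswith]
  rw [show ("\"" : String).toList = ['"'] from rfl]
  generalize t.toList = cs
  induction cs using List.reverseRecOn with
  | nil => simp
  | append_singleton l a _ =>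
    have hd : (l ++ [a]).drop ((l ++ [a]).length - 1) = [a] := by simp
    have hsuf : (List.isSuffixOf ['"'] (l ++ [a]) = true) ↔ a = '"' := by
      rw [List.isSuffixOf]; simp; exact eq_comm
    rw [hd, hsuf]
    simp

theorem enum_shift {α : Type} (l : List α) (s : Int) :
    PySem.List.enumerate l (s + 1) = (PySem.List.enumerate l s).map (fun p => (p.1 + 1, p.2)) := by
  induction l generalizing s with
  | nil => simp [PySem.List.enumerate_nil]
  | cons x xs ih =>
    simp only [PySem.List.enumerate_cons, List.map_cons]
    rw [ih (s + 1)]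

theorem closesB_nonneg (l : List String) (j : Int) (c : String) (h : (j, c) ∈ pvClosesB l) : 0 ≤ j := by
  have hm := List.mem_of_mem_filter h
  rw [PySem.List.mem_enumerate_iff] at hm
  obtain ⟨k, hk, hp⟩ := hm
  have : j = 0 + (k : Int) := congrArg Prod.fst hp
  omega

theorem startsB_nonneg (l : List String) (i : Int) (t : String) (h : (i, t) ∈ pvStartsB l) : 0 ≤ i := by
  have hm := List.mem_of_mem_filter h
  rw [PySem.List.mem_enumerate_iff] at hm
  obtain ⟨k, hk, hp⟩ := hm
  have : i = 0 + (k : Int) := congrArg Prod.fst hp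
  omega

theorem closesB_cons_pos (x : String) (rest : List String) (hx : PySem.Str.endswith x "\"" = true) :
    pvClosesB (x :: rest) = ((0:Int), x) :: (pvClosesB rest).map (fun p => (p.1 + 1, p.2)) := by
  rw [PySem.Str.endswith_eq, show ("\"" : String).toList = ['"'] from rfl] at hx
  unfold pvClosesB
  rw [PySem.List.enumerate_cons, show (0:Int) + 1 = 0 + 1 from rfl, enum_shift]
  simp [hx, List.filter_map, Function.comp_def]

theorem closesB_cons_neg (x : String) (rest : List String) (hx : ¬ PySem.Str.endswith x "\"" = true) :
    pvClosesB (x :: rest) = (pvClosesB rest).map (fun p => (p.1 + 1, p.2)) := by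
  rw [PySem.Str.endswith_eq, show ("\"" : String).toList = ['"'] from rfl] at hx
  unfold pvClosesB
  rw [PySem.List.enumerate_cons, show (0:Int) + 1 = 0 + 1 from rfl, enum_shift]
  simp [hx, List.filter_map, Function.comp_def]

theorem startsB_cons_pos (x : String) (rest : List String) (hx : PySem.Str.startswith x "\"" = true) :
    pvStartsB (x :: rest) = ((0:Int), x) :: (pvStartsB rest).map (fun p => (p.1 + 1, p.2)) := by
  rw [PySem.Str.startswith_eq, show ("\"" : String).toList = ['"'] from rfl] at hx
  unfold pvStartsB
  rw [PySem.List.enumerate_cons, show (0:Int) + 1 = 0 + 1 from rfl, enum_shift]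
  simp [hx, List.filter_map, Function.comp_def]

theorem startsB_cons_neg (x : String) (rest : List String) (hx : ¬ PySem.Str.startswith x "\"" = true) :
    pvStartsB (x :: rest) = (pvStartsB rest).map (fun p => (p.1 + 1, p.2)) := by
  rw [PySem.Str.startswith_eq, show ("\"" : String).toList = ['"'] from rfl] at hx
  unfold pvStartsB
  rw [PySem.List.enumerate_cons, show (0:Int) + 1 = 0 + 1 from rfl, enum_shift]
  simp [hx, List.filter_map, Function.comp_def]

theorem slice_to_succ_cons {α : Type} (x : α) (rest : List α) (j : Int) (hj : 0 ≤ j) :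
    PySem.List.slice (x :: rest) none (some (j + 1)) = x :: PySem.List.slice rest none (some j) := by
  rw [PySem.List.slice_to (x :: rest) (by omega : (0:Int) ≤ j + 1), PySem.List.slice_to rest hj,
    show (j + 1).toNat = j.toNat + 1 by omega]
  rfl

theorem tailA_eq (l : List String) (acc : List Char) :
    pvTailA l acc =
      match pvClosesB l with
      | [] => acc ++ l.flatMap (fun t => t.toList ++ [' '])
      | (j, c) :: _ =>
          acc ++ (PySem.List.slice l none (some j)).flatMap (fun t => t.toList ++ [' '])
            ++ PySem.List.slice c.toList none (some (-1)) := by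
  induction l generalizing acc with
  | nil => simp [pvTailA, pvClosesB, PySem.List.enumerate_nil]
  | cons x rest ih =>
    by_cases hx : PySem.Str.endswith x "\"" = true
    · rw [closesB_cons_pos x rest hx]
      simp only [pvTailA, if_pos ((end_iff x).mpr hx)]
      rw [PySem.List.slice_to (x :: rest) (le_refl (0:Int))]
      simp
    · rw [closesB_cons_neg x rest hx]
      have hx' : ¬ (PySem.List.slice x.toList (some (-1)) none = ['"']) :=
        fun h => hx ((end_iff x).mp h)
      simp only [pvTailA, if_neg hx']
      rw [ih]
      cases hc : pvClosesB rest with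
      | nil => simp
      | cons q tl =>
        obtain ⟨j, c⟩ := q
        have hj : 0 ≤ j := closesB_nonneg rest j c (by rw [hc]; exact List.mem_cons_self ..)
        simp only [List.map_cons]
        rw [slice_to_succ_cons x rest j hj]
        simp [List.append_assoc]

theorem slice_from_succ_cons {α : Type} (x : α) (rest : List α) (i : Int) (hi : 0 ≤ i) :
    PySem.List.slice (x :: rest) (some (i + 1 + 1)) none = PySem.List.slice rest (some (i + 1)) none := by
  rw [PySem.List.slice_from (x :: rest) (by omega : (0:Int) ≤ i + 1 + 1),
    PySem.List.slice_from rest (by omega : (0:Int) ≤ i + 1),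
    show (i + 1 + 1).toNat = (i + 1).toNat + 1 by omega]
  rfl

theorem scanA_eq (l : List String) :
    pvScanA l =
      match pvStartsB l with
      | [] => []
      | (i, t) :: _ =>
          pvTailA (PySem.List.slice l (some (i + 1)) none)
            (PySem.List.slice t.toList (some 1) none ++ [' ']) := by
  induction l with
  | nil => simp [pvScanA, pvStartsB, PySem.List.enumerate_nil]
  | cons x rest ih =>
    by_cases hx : PySem.Str.startswith x "\"" = true
    · rw [startsB_cons_pos x rest hx]
      simp only [pvScanA, if_pos ((start_iff x).mpr hx)]
      rw [show (0:Int) + 1 = ((1:Nat):Int) from rfl, PySem.List.slice_from_natCast]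
      rfl
    · rw [startsB_cons_neg x rest hx]
      have hx' : ¬ (PySem.List.slice x.toList none (some 1) = ['"']) :=
        fun h => hx ((start_iff x).mp h)
      simp only [pvScanA, if_neg hx']
      rw [ih]
      cases hs : pvStartsB rest with
      | nil => simp
      | cons q tl =>
        obtain ⟨i, t⟩ := q
        have hi : 0 ≤ i := startsB_nonneg rest i t (by rw [hs]; exact List.mem_cons_self ..)
        simp only [List.map_cons]
        rw [slice_from_succ_cons x rest i hi]

theorem joinSp (ts : List (List Char)) (x : List Char) :
    x ++ [' '] ++ ts.flatMap (fun y => y ++ [' ']) = PySem.Chars.join [' '] (x :: ts) ++ [' '] := by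
  induction ts generalizing x with
  | nil => simp [PySem.Chars.join_singleton]
  | cons y ts ih =>
    rw [PySem.Chars.join_cons_cons, List.append_assoc (x ++ [' ']), ← ih y]
    simp [List.append_assoc]

-- ===== VERDICT (by name: the statement is the Claim_ definition above) =====
theorem get_driver_key_word_spec : Claim_equal_get_driver_key_word := by
  intro my_array _
  unfold Spec_get_driver_key_word get_driver_key_word get_driver_key_word_alt
  rw [pvGoA_false, List.nil_append, scanA_eq]
  cases hs : pvStartsB my_array with
  | nil => rfl
  | cons p rest =>
    obtain ⟨i, t⟩ := p
    simp only
    rw [tailA_eq]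
    cases hc : pvClosesB (PySem.List.slice my_array (some (i + 1)) none) with
    | nil =>
      rw [← joinSp]
      simp [List.flatMap_map]
    | cons q rest' =>
      obtain ⟨j, c⟩ := q
      simp only
      rw [← joinSp]
      simp [List.flatMap_map, List.append_assoc]
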